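-- pv_equiv track=rewrite | github.com/whaozhu/motivic_hilbert | calculate_hilbert.py | calculate_syzygy_delta
-- ===== SOURCE A (Python) =====
-- def delta_min(delta, gamma):
--     """
--     Generates a list of elements from delta that do not have a residual in gamma when subtracted from any element in delta_min.
--
--     Parameters:
--     delta (list): The list of elements to process.
--     gamma (list): The list of residuals to check against.
--
--     Returns:
--     list: A new list containing elements from delta that meet the criteria.
--     """
--     delta_min = []
--     for i in range(len(delta)):
--         d = delta[i]
--         if i == 0:
--             delta_min.append(d)
--         else:
--             for j in range(len(delta_min)):
--                 residual = d - delta_min[j]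
--                 if residual in gamma:
--                     break
--             if residual not in gamma:
--                 delta_min.append(d)
--     return delta_min
--
-- def calculate_syzygy_delta(delta, gamma):
--     """
--     Calculates the syzygy delta for a given delta and gamma.
--
--     Parameters:
--     delta (list): The list of elements to process.
--     gamma (list): The list of residuals to check against.
--
--     Returns:
--     list: A list of elements that form the syzygy delta.
--     """
--     syz_delta = []
--     delta_min_ = delta_min(delta, gamma)
--     for i in range(len(delta)):
--         d = delta[i]
--         count = 0
--         for j in range(len(delta_min_)):
--             residual = d - delta_min_[j]
--             if residual in gamma:
--                 count += 1
--             if count == 2: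
--                 break
--         if count >= 2:
--             syz_delta.append(d)
--     return syz_delta
-- ===== SOURCE B (Python) =====
-- def calculate_syzygy_delta(delta, gamma):
--     # Sumset frequency table: freq[m + g] = number of selected generators m
--     # (with multiplicity) having residual g in gamma, over distinct g.
--     # d is a new generator exactly when d is not a key of freq, and
--     # d belongs to the syzygy delta exactly when freq[d] >= 2.
--     gset = set(gamma)
--     freq = {}
--     for d in delta:
--         if d not in freq:
--             for g in gset:
--                 freq[d + g] = freq.get(d + g, 0) + 1
--     return [d for d in delta if freq.get(d, 0) >= 2]
-- ===== Notes on version B (the rewrite author's own statement) =====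
-- stated objective: faster
-- what changed: B never materialises a delta_min list or scans it: it maintains a single sumset frequency dictionary freq over m+g (selected generator m, distinct gamma value g); an element is a new generator exactly when it is not a key of freq, and the final pass keeps d exactly when freq[d] >= 2, so both the generator test and the residual count become one dictionary lookup.
import Mathlib
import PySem

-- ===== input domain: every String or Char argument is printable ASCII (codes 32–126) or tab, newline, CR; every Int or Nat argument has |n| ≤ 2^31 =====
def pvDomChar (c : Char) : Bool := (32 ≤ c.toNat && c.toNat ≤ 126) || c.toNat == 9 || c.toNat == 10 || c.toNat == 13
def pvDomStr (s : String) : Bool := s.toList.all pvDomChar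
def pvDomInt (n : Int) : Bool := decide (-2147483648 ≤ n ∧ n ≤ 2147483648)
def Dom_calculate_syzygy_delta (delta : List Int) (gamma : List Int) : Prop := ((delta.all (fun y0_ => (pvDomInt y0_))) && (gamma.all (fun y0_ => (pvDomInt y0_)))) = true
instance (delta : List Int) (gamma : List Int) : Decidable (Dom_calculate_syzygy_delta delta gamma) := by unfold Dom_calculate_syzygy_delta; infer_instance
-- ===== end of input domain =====

-- B replaces the delta_min list and its scans by one sumset frequency dictionary freq over m+g
-- (selected generator m, distinct gamma value g): new-generator test and residual count are each
-- a single lookup (objective: faster; measured).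

-- ===== PORT A =====

-- A's inner 'for j … break' loop of delta_min: returns the value the variable
-- 'residual' holds after the loop (the first residual in gamma, else the last one computed).
def pvInnerRes (d : Int) (gamma : List Int) : List Int → Int
  | [] => 0          -- unreachable: the loop body runs only with a nonempty delta_min
  | [m] => d - m
  | m :: m' :: rest => if (d - m) ∈ gamma then d - m else pvInnerRes d gamma (m' :: rest)

def pvAStepDM (delta gamma : List Int) (dm : List Int) (i : Int) : List Int :=
  let d := PySem.List.pyGetD delta i 0
  if i = 0 then dm ++ [d]
  else
    let residual := pvInnerRes d gamma dm
    if residual ∈ gamma then dm else dm ++ [d]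

def pyDeltaMin (delta gamma : List Int) : List Int :=
  (PySem.List.pyRange 0 (PySem.List.len delta) 1).foldl (pvAStepDM delta gamma) []

-- A's counting loop over delta_min with the 'if count == 2: break'
def pvCountLoop (d : Int) (gamma : List Int) : List Int → Int → Int
  | [], c => c
  | m :: rest, c =>
    let c' := if (d - m) ∈ gamma then c + 1 else c
    if c' = 2 then c' else pvCountLoop d gamma rest c'

def calculate_syzygy_delta (delta : List Int) (gamma : List Int) : List Int :=
  let dm := pyDeltaMin delta gamma
  (PySem.List.pyRange 0 (PySem.List.len delta) 1).foldl (fun syz i =>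
    let d := PySem.List.pyGetD delta i 0
    if pvCountLoop d gamma dm 0 ≥ 2 then syz ++ [d] else syz) []

-- ===== PORT B =====

-- B's inner loop: for g in gset: freq[d+g] = freq.get(d+g, 0) + 1
def pvBInner (gset : List Int) (freq : PySem.Dict Int Int) (d : Int) : PySem.Dict Int Int :=
  gset.foldl (fun f g => f.insert (d + g) (f.getD (d + g) 0 + 1)) freq

-- B's outer loop body: if d not in freq: run the inner loop
def pvBStep (gset : List Int) (freq : PySem.Dict Int Int) (d : Int) : PySem.Dict Int Int :=
  if freq.get? d = none then pvBInner gset freq d else freq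

def calculate_syzygy_delta_alt (delta : List Int) (gamma : List Int) : List Int :=
  let gset := PySem.Set.ofList gamma
  let freq := delta.foldl (pvBStep gset) PySem.Dict.empty
  delta.filter (fun d => freq.getD d 0 ≥ 2)

-- ===== PRECONDITION & SPEC =====
def Spec_calculate_syzygy_delta (delta : List Int) (gamma : List Int) (out : List Int) : Prop := out = calculate_syzygy_delta_alt delta gamma
instance (delta : List Int) (gamma : List Int) (out : List Int) : Decidable (Spec_calculate_syzygy_delta delta gamma out) := by unfold Spec_calculate_syzygy_delta; infer_instance

-- ===== CLAIM =====
def Claim_equal_calculate_syzygy_delta : Prop := ∀ (delta : List Int) (gamma : List Int), Dom_calculate_syzygy_delta delta gamma → Spec_calculate_syzygy_delta delta gamma (calculate_syzygy_delta delta gamma)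

-- ===== LEMMAS AND PROOFS =====

-- proof-only abstraction of A's greedy delta_min step (append d iff no residual against dm is in gset)
def pvDMSpecStep (gset : List Int) (dm : List Int) (d : Int) : List Int :=
  if dm = [] ∨ ∀ m ∈ dm, (d - m) ∉ gset then dm ++ [d] else dm

-- number of elements of dm whose residual from x lies in gset
def pvCnt (gset dm : List Int) (x : Int) : Int :=
  (dm.countP (fun m => decide ((x - m) ∈ gset)) : Int)

-- the invariant tying B's dictionary to the greedy list
def pvInv (gset dm : List Int) (f : PySem.Dict Int Int) : Prop :=
  ∀ x, f.get? x = if pvCnt gset dm x = 0 then none else some (pvCnt gset dm x)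

-- the leaked 'residual' is in gamma iff some element of delta_min has its residual in gamma
lemma pvInnerRes_mem (d : Int) (gamma : List Int) :
    ∀ dm : List Int, dm ≠ [] →
      (pvInnerRes d gamma dm ∈ gamma ↔ ∃ m ∈ dm, (d - m) ∈ gamma) := by
  intro dm
  induction dm with
  | nil => intro h; exact absurd rfl h
  | cons m rest ih =>
    intro _
    cases rest with
    | nil => simp [pvInnerRes]
    | cons m' rest' =>
      by_cases h : (d - m) ∈ gamma
      · simp [pvInnerRes, h]
      · simp only [pvInnerRes, if_neg h]
        rw [ih (by simp)]
        simp [h]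

-- one step of A's delta_min loop equals the abstract greedy step
lemma pvStep_eq (delta gamma : List Int) (k : Nat) (hk : k < delta.length)
    (dm : List Int) (hdm : dm = [] ↔ k = 0) :
    pvAStepDM delta gamma dm (k : Int) = pvDMSpecStep (PySem.Set.ofList gamma) dm delta[k] := by
  have hd : PySem.List.pyGetD delta (k : Int) 0 = delta[k] := by
    rw [PySem.List.pyGetD_natCast]
    exact List.getD_eq_getElem _ _ hk
  rcases Nat.eq_zero_or_pos k with h0 | h0
  · subst h0
    have hdm0 : dm = [] := hdm.mpr rfl
    subst hdm0
    norm_cast at hd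
    simp [pvAStepDM, pvDMSpecStep, hd]
  · have hkne : (k : Int) ≠ 0 := by omega
    have hdmne : dm ≠ [] := fun h => by have := hdm.mp h; omega
    simp only [pvAStepDM, pvDMSpecStep, hd, if_neg hkne]
    by_cases h : ∃ m ∈ dm, (delta[k] - m) ∈ gamma
    · have hc : ¬(dm = [] ∨ ∀ m ∈ dm, delta[k] - m ∉ PySem.Set.ofList gamma) := by
        rintro (hnil | hall)
        · exact hdmne hnil
        · obtain ⟨m, hm, hmem⟩ := h
          exact hall m hm ((PySem.Set.mem_ofList _ _).mpr hmem)
      rw [if_pos ((pvInnerRes_mem delta[k] gamma dm hdmne).mpr h), if_neg hc]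
    · have hc : dm = [] ∨ ∀ m ∈ dm, delta[k] - m ∉ PySem.Set.ofList gamma :=
        Or.inr (fun m hm hmem => h ⟨m, hm, (PySem.Set.mem_ofList _ _).mp hmem⟩)
      rw [if_neg (fun hcc => h ((pvInnerRes_mem delta[k] gamma dm hdmne).mp hcc)), if_pos hc]

lemma pvDM_fold (delta gamma : List Int) :
    ∀ (n k : Nat) (dm : List Int), n = delta.length - k → (dm = [] ↔ k = 0) →
      (PySem.List.pyRange (k : Int) (PySem.List.len delta) 1).foldl (pvAStepDM delta gamma) dm
      = (delta.drop k).foldl (pvDMSpecStep (PySem.Set.ofList gamma)) dm := by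
  intro n
  induction n with
  | zero =>
    intro k dm hn _
    have hk : delta.length ≤ k := by omega
    rw [PySem.List.pyRange_one_eq_nil (by simp [PySem.List.len_eq]; exact_mod_cast hk),
        List.drop_eq_nil_of_le hk]
    rfl
  | succ n ih =>
    intro k dm hn hdm
    have hk : k < delta.length := by omega
    rw [PySem.List.pyRange_one_cons (by simp [PySem.List.len_eq]; exact_mod_cast hk)]
    rw [List.drop_eq_getElem_cons hk]
    simp only [List.foldl_cons]
    rw [pvStep_eq delta gamma k hk dm hdm]
    have : ((k : Int) + 1) = ((k + 1 : Nat) : Int) := by push_cast; ring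
    rw [this, ih (k + 1) _ (by omega) ?_]
    constructor
    · intro h
      unfold pvDMSpecStep at h
      split_ifs at h with hc
      · exact absurd h (by simp)
      · exact absurd (Or.inl h) hc
    · intro h; exact absurd h (by omega)

lemma pyDeltaMin_eq (delta gamma : List Int) :
    pyDeltaMin delta gamma = delta.foldl (pvDMSpecStep (PySem.Set.ofList gamma)) [] := by
  have := pvDM_fold delta gamma (delta.length) 0 [] (by omega) (by simp)
  simpa [pyDeltaMin] using this

-- A's capped counting loop computes min 2 (c + number of residuals in gamma)
lemma pvCountLoop_eq (d : Int) (gamma : List Int) :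
    ∀ (l : List Int) (c : Int), c < 2 →
      pvCountLoop d gamma l c = min 2 (c + (l.countP (fun m => decide ((d - m) ∈ gamma)) : Int)) := by
  intro l
  induction l with
  | nil => intro c hc; simp [pvCountLoop]; omega
  | cons m rest ih =>
    intro c hc
    simp only [pvCountLoop, List.countP_cons]
    by_cases h : (d - m) ∈ gamma
    · simp only [h, decide_true, if_true]
      by_cases h2 : c + 1 = 2
      · rw [if_pos h2]
        have : (0:Int) ≤ (rest.countP (fun m => decide ((d - m) ∈ gamma)) : Int) := by positivity
        push_cast
        omega
      · rw [if_neg h2, ih _ (by omega)]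
        push_cast
        omega
    · simp only [h, decide_false, if_false, if_neg (by omega : ¬ c = 2)]
      rw [ih _ hc]
      push_cast
      omega

-- effect of B's inner loop on a Nodup gset: bump exactly the keys d+g
lemma pvBInner_get? (d x : Int) :
    ∀ (G : List Int), G.Nodup → ∀ (f : PySem.Dict Int Int),
      (pvBInner G f d).get? x
        = if (x - d) ∈ G then some (f.getD x 0 + 1) else f.get? x := by
  intro G
  induction G with
  | nil => intro _ f; simp [pvBInner]
  | cons g rest ih =>
    intro hnd f
    obtain ⟨hg, hrest⟩ := List.nodup_cons.mp hnd
    simp only [pvBInner, List.foldl_cons]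
    have hih := ih hrest (f.insert (d + g) (f.getD (d + g) 0 + 1))
    rw [show (rest.foldl (fun f g => f.insert (d + g) (f.getD (d + g) 0 + 1))
          (f.insert (d + g) (f.getD (d + g) 0 + 1))) = pvBInner rest (f.insert (d + g) (f.getD (d + g) 0 + 1)) d from rfl, hih]
    by_cases hx : x = d + g
    · have hxd : x - d = g := by omega
      rw [if_neg (by rw [hxd]; exact hg), if_pos (by rw [hxd]; exact List.mem_cons_self)]
      rw [PySem.Dict.get?_insert, if_pos hx, hx]
    · have hxd : x - d ≠ g := fun h => hx (by omega)
      rw [PySem.Dict.getD_insert, if_neg hx, PySem.Dict.get?_insert, if_neg hx]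
      by_cases hm : (x - d) ∈ rest
      · rw [if_pos hm, if_pos (List.mem_cons_of_mem _ hm)]
      · rw [if_neg hm, if_neg (by simp [List.mem_cons, hxd, hm])]

-- under the invariant, getD reads off the residual count
lemma pvInv_getD (gset dm : List Int) (f : PySem.Dict Int Int) (h : pvInv gset dm f) (x : Int) :
    f.getD x 0 = pvCnt gset dm x := by
  rw [PySem.Dict.getD_eq_get?_getD, h x]
  by_cases hc : pvCnt gset dm x = 0
  · simp [hc]
  · simp [hc]

-- invariant preservation through one step of the two loops
lemma pvInv_step (gset : List Int) (hG : gset.Nodup) (dm : List Int)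
    (f : PySem.Dict Int Int) (h : pvInv gset dm f) (d : Int) :
    pvInv gset (pvDMSpecStep gset dm d) (pvBStep gset f d) := by
  have hcnt_nonneg : ∀ x, 0 ≤ pvCnt gset dm x := fun x => Int.natCast_nonneg _
  by_cases hd : f.get? d = none
  · -- d is a new generator: both sides extend
    have hc0 : pvCnt gset dm d = 0 := by
      by_contra hc
      rw [h d, if_neg hc] at hd
      exact Option.some_ne_none _ hd
    have hall : ∀ m ∈ dm, (d - m) ∉ gset := by
      have hc0' : dm.countP (fun m => decide ((d - m) ∈ gset)) = 0 := by
        unfold pvCnt at hc0; exact_mod_cast hc0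
      have := List.countP_eq_zero.mp hc0'
      intro m hm hmem
      exact absurd (decide_eq_true hmem) (by simpa using this m hm)
    unfold pvDMSpecStep pvBStep
    rw [if_pos (Or.inr hall), if_pos hd]
    intro x
    rw [pvBInner_get? d x gset hG f]
    have hsplit : pvCnt gset (dm ++ [d]) x
        = pvCnt gset dm x + (if (x - d) ∈ gset then 1 else 0) := by
      unfold pvCnt
      rw [List.countP_append]
      by_cases hxg : (x - d) ∈ gset
      · simp [hxg]
      · simp [hxg]
    by_cases hxg : (x - d) ∈ gset
    · rw [if_pos hxg, pvInv_getD gset dm f h x]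
      rw [if_neg (by have := hcnt_nonneg x; rw [hsplit, if_pos hxg]; omega)]
      rw [hsplit, if_pos hxg]
    · rw [if_neg hxg, h x, hsplit, if_neg hxg, add_zero]
  · -- d already covered: both sides unchanged
    have hcne : pvCnt gset dm d ≠ 0 := by
      intro hc
      rw [h d, if_pos hc] at hd
      exact hd rfl
    have hex : ¬(dm = [] ∨ ∀ m ∈ dm, (d - m) ∉ gset) := by
      rintro (hnil | hall)
      · exact hcne (by simp [pvCnt, hnil])
      · exact hcne (by
          unfold pvCnt
          norm_cast
          exact List.countP_eq_zero.mpr (fun m hm => by simpa using hall m hm))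
    unfold pvDMSpecStep pvBStep
    rw [if_neg hex, if_neg hd]
    exact h

lemma pvInv_fold (gset : List Int) (hG : gset.Nodup) :
    ∀ (l dm : List Int) (f : PySem.Dict Int Int), pvInv gset dm f →
      pvInv gset (l.foldl (pvDMSpecStep gset) dm) (l.foldl (pvBStep gset) f) := by
  intro l
  induction l with
  | nil => intro dm f h; exact h
  | cons d rest ih =>
    intro dm f h
    exact ih _ _ (pvInv_step gset hG dm f h d)

-- a Prop-conditioned append fold is a filter (instance of PySem.List.foldl_append_if)
lemma pvFoldFilter (p : Int → Prop) [DecidablePred p] (l acc : List Int) :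
    l.foldl (fun acc x => if p x then acc ++ [x] else acc) acc
      = acc ++ l.filter (fun x => decide (p x)) := by
  have := PySem.List.foldl_append_if (fun x => decide (p x)) id l acc
  simpa [decide_eq_true_eq] using this

-- ===== VERDICT =====
theorem calculate_syzygy_delta_spec : Claim_equal_calculate_syzygy_delta := by
  unfold Claim_equal_calculate_syzygy_delta
  intro delta gamma _
  unfold Spec_calculate_syzygy_delta calculate_syzygy_delta calculate_syzygy_delta_alt
  rw [pyDeltaMin_eq]
  set gset := PySem.Set.ofList gamma with hgset
  set dm := delta.foldl (pvDMSpecStep gset) [] with hdm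
  set freq := delta.foldl (pvBStep gset) PySem.Dict.empty with hfreq
  have hG : gset.Nodup := PySem.Set.nodup_ofList gamma
  have hbase : pvInv gset [] PySem.Dict.empty := by
    intro x
    simp [pvCnt, PySem.Dict.get?_empty]
  have hInv : pvInv gset dm freq := pvInv_fold gset hG delta [] PySem.Dict.empty hbase
  rw [PySem.List.foldl_pyRange_zero_pyGetD delta 0
        (fun syz d => if pvCountLoop d gamma dm 0 ≥ 2 then syz ++ [d] else syz) []]
  rw [pvFoldFilter (fun d => pvCountLoop d gamma dm 0 ≥ 2) delta []]
  rw [List.nil_append]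
  apply List.filter_congr
  intro d _
  simp only [decide_eq_decide]
  rw [pvCountLoop_eq d gamma dm 0 (by omega)]
  rw [pvInv_getD gset dm freq hInv d]
  have hcp : dm.countP (fun m => decide ((d - m) ∈ gamma))
      = dm.countP (fun m => decide ((d - m) ∈ gset)) :=
    List.countP_congr (fun m _ => by simp [hgset, PySem.Set.mem_ofList])
  unfold pvCnt
  rw [hcp]
  have : (0:Int) ≤ (dm.countP (fun m => decide ((d - m) ∈ gset)) : Int) := Int.natCast_nonneg _
  omega
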